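-- pv_equiv track=rewrite | github.com/roelandordelman/mediasuite-knowledge-base | pipelines/ingest/ingest_publications.py | extract_relevant_passages
-- ===== SOURCE A (Python) =====
-- MAX_SECTION_CHARS = 3000
--
-- def extract_relevant_passages(
--     sections: dict[str, str],
--     known_tools: list[str],
--     known_collections: list[str],
-- ) -> dict[str, str]:
--     always_keep = {"abstract", "conclusion", "summary", "preamble"}
--     never_keep = {"references", "acknowledgment", "acknowledgments", "bibliography"}
--     ms_terms_lower = (
--         ["media suite", "mediasuite", "clariah media"]
--         + [t.lower() for t in known_tools]
--         + [c.lower() for c in known_collections]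
--     )
--     kept = {}
--     for name, text in sections.items():
--         if any(k in name for k in never_keep):
--             continue
--         if any(k in name for k in always_keep):
--             kept[name] = text[:MAX_SECTION_CHARS]
--         elif any(term in text.lower() for term in ms_terms_lower):
--             kept[name] = text[:MAX_SECTION_CHARS]
--     return kept
-- ===== SOURCE B (Python) =====
-- MAX_SECTION_CHARS = 3000
--
-- def extract_relevant_passages(sections, known_tools, known_collections):
--     # Term-major strategy: lowercase every section text ONCE, then sweep each
--     # search term over all lowered texts, recording the indices of matching
--     # sections in a set; one final pass applies the name rules.
--     always_keep = ("abstract", "conclusion", "summary", "preamble")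
--     never_keep = ("references", "acknowledgment", "acknowledgments", "bibliography")
--     terms = (
--         ["media suite", "mediasuite", "clariah media"]
--         + [t.lower() for t in known_tools]
--         + [c.lower() for c in known_collections]
--     )
--     items = list(sections.items())
--     lowered = [text.lower() for _, text in items]
--     hit = set()
--     for term in terms:
--         for i, lt in enumerate(lowered):
--             if i not in hit and term in lt:
--                 hit.add(i)
--     out = {}
--     for i, (name, text) in enumerate(items):
--         if any(k in name for k in never_keep):
--             continue
--         if any(k in name for k in always_keep) or i in hit:
--             out[name] = text[:MAX_SECTION_CHARS]
--     return out
-- ===== Notes on version B (the rewrite author's own statement) =====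
-- stated objective: alternative
-- what changed: B inverts the loop nesting: it lowercases every section text once, then sweeps term-by-term over the lowered texts building a set of matching section indices, and a final pass applies the name rules; A instead scans all terms per section, recomputing text.lower() for every term.
import Mathlib
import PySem

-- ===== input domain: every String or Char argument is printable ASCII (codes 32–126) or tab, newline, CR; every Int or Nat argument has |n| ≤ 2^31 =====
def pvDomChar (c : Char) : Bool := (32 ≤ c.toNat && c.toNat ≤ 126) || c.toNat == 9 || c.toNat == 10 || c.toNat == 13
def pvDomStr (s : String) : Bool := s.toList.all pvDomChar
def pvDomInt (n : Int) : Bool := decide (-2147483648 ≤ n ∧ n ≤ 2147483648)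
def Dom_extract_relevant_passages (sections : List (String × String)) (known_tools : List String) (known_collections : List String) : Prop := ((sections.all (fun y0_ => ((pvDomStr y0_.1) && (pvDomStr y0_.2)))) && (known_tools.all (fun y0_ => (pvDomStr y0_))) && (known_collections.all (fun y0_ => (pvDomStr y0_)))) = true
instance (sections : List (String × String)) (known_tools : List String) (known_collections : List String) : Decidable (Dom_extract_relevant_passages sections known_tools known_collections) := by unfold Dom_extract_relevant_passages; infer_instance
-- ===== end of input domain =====

-- B inverts the loop nesting (term-major sweep with a hit-index set, texts lowered once)
-- instead of A's section-major scan that re-lowers the text for every term; return values equal.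

-- ===== PORT A =====
-- the body of A's 'for name, text in sections.items()' loop
def pvStepA (ms_terms_lower : List String) (kept : PySem.Dict String String) (p : String × String) : PySem.Dict String String :=
  if (PySem.Set.ofList ["references", "acknowledgment", "acknowledgments", "bibliography"]).any
      (fun k => PySem.Str.isIn k p.1) then kept
  else if (PySem.Set.ofList ["abstract", "conclusion", "summary", "preamble"]).any
      (fun k => PySem.Str.isIn k p.1) then
    kept.insert p.1 (PySem.Str.slice p.2 none (some 3000))
  else if ms_terms_lower.any (fun term => PySem.Str.isIn term (PySem.Str.lower p.2)) then
    kept.insert p.1 (PySem.Str.slice p.2 none (some 3000))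
  else kept

def extract_relevant_passages (sections : List (String × String)) (known_tools : List String) (known_collections : List String) : List (String × String) :=
  let ms_terms_lower : List String :=
    ["media suite", "mediasuite", "clariah media"]
      ++ known_tools.map PySem.Str.lower ++ known_collections.map PySem.Str.lower
  let kept : PySem.Dict String String := sections.foldl (pvStepA ms_terms_lower) PySem.Dict.empty
  kept.items

-- ===== PORT B =====
-- the body of B's inner 'for i, lt in enumerate(lowered)' loop, for one term
def pvHitStep (term : String) (h : PySem.Set Int) (q : Int × String) : PySem.Set Int :=
  if !h.contains q.1 && PySem.Str.isIn term q.2 then h.add q.1 else h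

-- the body of B's final 'for i, (name, text) in enumerate(items)' loop
def pvOutStep (hit : PySem.Set Int) (out : PySem.Dict String String) (q : Int × (String × String)) : PySem.Dict String String :=
  if ["references", "acknowledgment", "acknowledgments", "bibliography"].any
      (fun k => PySem.Str.isIn k q.2.1) then out
  else if ["abstract", "conclusion", "summary", "preamble"].any (fun k => PySem.Str.isIn k q.2.1)
      || hit.contains q.1 then
    out.insert q.2.1 (PySem.Str.slice q.2.2 none (some 3000))
  else out

def extract_relevant_passages_alt (sections : List (String × String)) (known_tools : List String) (known_collections : List String) : List (String × String) :=
  let terms : List String :=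
    ["media suite", "mediasuite", "clariah media"]
      ++ known_tools.map PySem.Str.lower ++ known_collections.map PySem.Str.lower
  let lowered : List String := sections.map (fun p => PySem.Str.lower p.2)
  let hit : PySem.Set Int :=
    terms.foldl (fun h term => (PySem.List.enumerate lowered).foldl (pvHitStep term) h) PySem.Set.empty
  let out : PySem.Dict String String :=
    (PySem.List.enumerate sections).foldl (pvOutStep hit) PySem.Dict.empty
  out.items

-- ===== PRECONDITION & SPEC =====
def Spec_extract_relevant_passages (sections : List (String × String)) (known_tools : List String) (known_collections : List String) (out : List (String × String)) : Prop := out = extract_relevant_passages_alt sections known_tools known_collections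
instance (sections : List (String × String)) (known_tools : List String) (known_collections : List String) (out : List (String × String)) : Decidable (Spec_extract_relevant_passages sections known_tools known_collections out) := by unfold Spec_extract_relevant_passages; infer_instance

-- ===== CLAIM (what is proved, stated in full; the proofs are below) =====
def Claim_equal_extract_relevant_passages : Prop := ∀ (sections : List (String × String)) (known_tools : List String) (known_collections : List String), Dom_extract_relevant_passages sections known_tools known_collections → Spec_extract_relevant_passages sections known_tools known_collections (extract_relevant_passages sections known_tools known_collections)

-- ===== LEMMAS AND PROOFS =====

-- membership in the inner (one-term) fold of B's hit set
theorem pv_mem_hitStep_fold (term : String) (l : List (Int × String)) (h : PySem.Set Int) (x : Int) :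
    x ∈ l.foldl (pvHitStep term) h ↔ x ∈ h ∨ ∃ q ∈ l, q.1 = x ∧ PySem.Str.isIn term q.2 = true := by
  induction l generalizing h with
  | nil => simp
  | cons q l ih =>
    obtain ⟨i, lt⟩ := q
    rw [List.foldl_cons, ih]
    by_cases hc : (!PySem.Set.contains h i && PySem.Str.isIn term lt) = true
    · rw [pvHitStep, if_pos hc, PySem.Set.mem_add]
      simp only [Bool.and_eq_true, Bool.not_eq_true'] at hc
      constructor
      · rintro ((hx | hxi) | ⟨r, hr, h1, h2⟩)
        · exact Or.inl hx
        · refine Or.inr ⟨(i, lt), ?_, ?_, ?_⟩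
          · simp
          · exact hxi.symm
          · exact hc.2
        · exact Or.inr ⟨r, by simp [hr], h1, h2⟩
      · rintro (hx | ⟨r, hr, h1, h2⟩)
        · exact Or.inl (Or.inl hx)
        · rcases List.mem_cons.mp hr with rfl | hr
          · exact Or.inl (Or.inr h1.symm)
          · exact Or.inr ⟨r, hr, h1, h2⟩
    · rw [pvHitStep, if_neg hc]
      simp only [Bool.and_eq_true, Bool.not_eq_true'] at hc
      constructor
      · rintro (hx | ⟨r, hr, h1, h2⟩)
        · exact Or.inl hx
        · exact Or.inr ⟨r, by simp [hr], h1, h2⟩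
      · rintro (hx | ⟨r, hr, h1, h2⟩)
        · exact Or.inl hx
        · rcases List.mem_cons.mp hr with rfl | hr
          · -- r matched but the guard failed: then r.1 was already in h
            rcases not_and_or.mp hc with hcon | hin
            · have hmem : i ∈ h := (PySem.Set.contains_iff h i).mp (by
                cases hcc : PySem.Set.contains h i with
                | true => rfl
                | false => exact absurd hcc hcon)
              exact Or.inl (h1 ▸ hmem)
            · exact absurd h2 hin
          · exact Or.inr ⟨r, hr, h1, h2⟩

-- membership in B's full hit set
theorem pv_mem_hit_fold (terms : List String) (l : List (Int × String)) (h : PySem.Set Int) (x : Int) :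
    x ∈ terms.foldl (fun h term => l.foldl (pvHitStep term) h) h ↔
      x ∈ h ∨ ∃ t ∈ terms, ∃ q ∈ l, q.1 = x ∧ PySem.Str.isIn t q.2 = true := by
  induction terms generalizing h with
  | nil => simp
  | cons t ts ih =>
    simp only [List.foldl_cons, ih, pv_mem_hitStep_fold]
    constructor
    · rintro ((hx | hq) | ⟨t', ht', hq⟩)
      · exact Or.inl hx
      · exact Or.inr ⟨t, by simp, hq⟩
      · exact Or.inr ⟨t', by simp [ht'], hq⟩
    · rintro (hx | ⟨t', ht', hq⟩)
      · exact Or.inl (Or.inl hx)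
      · rcases List.mem_cons.mp ht' with rfl | ht'
        · exact Or.inl (Or.inr hq)
        · exact Or.inr ⟨t', ht', hq⟩

-- B's hit set decides exactly A's per-section term test
theorem pv_hit_contains (terms : List String) (sections : List (String × String))
    (k : Nat) (hk : k < sections.length) :
    PySem.Set.contains
      (terms.foldl (fun h term =>
        (PySem.List.enumerate (sections.map (fun p => PySem.Str.lower p.2))).foldl (pvHitStep term) h)
        PySem.Set.empty) ((k : Int))
      = terms.any (fun t => PySem.Str.isIn t (PySem.Str.lower (sections[k].2))) := by
  rcases ha : terms.any (fun t => PySem.Str.isIn t (PySem.Str.lower (sections[k].2))) with _ | _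
  · rw [Bool.eq_false_iff]
    intro hcon
    have hmem := (PySem.Set.contains_iff _ _).mp hcon
    rw [pv_mem_hit_fold] at hmem
    rcases hmem with hx | ⟨t, ht, q, hq, h1, h2⟩
    · simp [PySem.Set.empty] at hx
    · rw [PySem.List.mem_enumerate_iff] at hq
      obtain ⟨j, hj, hq'⟩ := hq
      rw [hq'] at h1 h2
      simp only [List.getElem_map] at h1 h2
      have hjk : j = k := by simpa using h1
      subst hjk
      have hf := List.any_eq_false.mp ha t ht
      simp only [Bool.not_eq_true] at hf
      simp at hf h2
      exact absurd h2 (by simp [hf])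
  · apply (PySem.Set.contains_iff _ _).mpr
    rw [pv_mem_hit_fold]
    obtain ⟨t, ht, hin⟩ := List.any_eq_true.mp ha
    refine Or.inr ⟨t, ht, ((k : Int), PySem.Str.lower (sections[k].2)), ?_, rfl, hin⟩
    rw [PySem.List.mem_enumerate_iff]
    exact ⟨k, by simpa using hk, by simp⟩

-- the two output loops build the same dict, given that 'hit' decides the term test at each index
theorem pv_folds_eq (terms : List String) (hit : PySem.Set Int) :
    ∀ (l : List (String × String)) (s : Int) (d : PySem.Dict String String),
    (∀ q ∈ PySem.List.enumerate l s,
        PySem.Set.contains hit q.1 = terms.any (fun t => PySem.Str.isIn t (PySem.Str.lower q.2.2))) →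
    l.foldl (pvStepA terms) d = (PySem.List.enumerate l s).foldl (pvOutStep hit) d := by
  intro l
  induction l with
  | nil => intro s d _; simp [PySem.List.enumerate]
  | cons p l ih =>
    intro s d hq
    rw [PySem.List.enumerate_cons, List.foldl_cons, List.foldl_cons]
    have hp := hq (s, p) (by rw [PySem.List.enumerate_cons]; exact List.mem_cons_self)
    have hstep : pvStepA terms d p = pvOutStep hit d (s, p) := by
      have hnev : PySem.Set.ofList ["references", "acknowledgment", "acknowledgments", "bibliography"]
          = ["references", "acknowledgment", "acknowledgments", "bibliography"] := by decide
      have halw : PySem.Set.ofList ["abstract", "conclusion", "summary", "preamble"]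
          = ["abstract", "conclusion", "summary", "preamble"] := by decide
      simp only [pvStepA, pvOutStep, hnev, halw, ← hp]
      rcases (["references", "acknowledgment", "acknowledgments", "bibliography"] : List String).any
          (fun k => PySem.Str.isIn k p.1) with _ | _
      · rcases (["abstract", "conclusion", "summary", "preamble"] : List String).any
            (fun k => PySem.Str.isIn k p.1) with _ | _
        · simp only [Bool.false_or]
          rcases PySem.Set.contains hit s with _ | _ <;> simp
        · simp
      · simp
    rw [hstep, ih (s + 1) _ (fun q hmem => hq q (by rw [PySem.List.enumerate_cons]; exact List.mem_cons_of_mem _ hmem))]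

-- ===== VERDICT (by name: the statement is the Claim_ definition above) =====
theorem extract_relevant_passages_spec : Claim_equal_extract_relevant_passages := by
  intro sections known_tools known_collections _
  show _ = _
  simp only [extract_relevant_passages, extract_relevant_passages_alt]
  congr 1
  apply pv_folds_eq
  intro q hmem
  rw [PySem.List.mem_enumerate_iff] at hmem
  obtain ⟨k, hk, rfl⟩ := hmem
  show PySem.Set.contains _ ((0 : Int) + (k : Int)) = _
  rw [zero_add]
  exact pv_hit_contains _ sections k hk
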